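-- pv_equiv track=rewrite | github.com/ShlokNoval/TeamInnovex | AI_Engine/scoring.py | severity_distribution
-- ===== SOURCE A (Python) =====
-- def severity_distribution(incidents: list) -> dict:
--     dist = {
--         'pothole': {'LOW': 0, 'MEDIUM': 0, 'HIGH': 0},
--         'animal': {'LOW': 0, 'MEDIUM': 0, 'HIGH': 0},
--         'accident': {'LOW': 0, 'MEDIUM': 0, 'HIGH': 0}
--     }
--     for i in incidents:
--         hazard = i.get('type')
--         label = i.get('severity_label')
--         if hazard in dist and label in dist[hazard]:
--             dist[hazard][label] += 1
--     return dist
-- ===== SOURCE B (Python) =====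
-- def severity_distribution(incidents: list) -> dict:
--     hazards = ['pothole', 'animal', 'accident']
--     labels = ['LOW', 'MEDIUM', 'HIGH']
--     return {
--         h: {l: sum(1 for i in incidents
--                    if i.get('type') == h and i.get('severity_label') == l)
--             for l in labels}
--         for h in hazards
--     }
-- ===== Notes on version B (the rewrite author's own statement) =====
-- stated objective: idiomatic
-- what changed: The single mutating pass that increments cells of a pre-built nested dict is replaced by a nested dict comprehension over the fixed hazard/label template, computing each of the nine cells with its own counting scan (sum of a generator).
import Mathlib
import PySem

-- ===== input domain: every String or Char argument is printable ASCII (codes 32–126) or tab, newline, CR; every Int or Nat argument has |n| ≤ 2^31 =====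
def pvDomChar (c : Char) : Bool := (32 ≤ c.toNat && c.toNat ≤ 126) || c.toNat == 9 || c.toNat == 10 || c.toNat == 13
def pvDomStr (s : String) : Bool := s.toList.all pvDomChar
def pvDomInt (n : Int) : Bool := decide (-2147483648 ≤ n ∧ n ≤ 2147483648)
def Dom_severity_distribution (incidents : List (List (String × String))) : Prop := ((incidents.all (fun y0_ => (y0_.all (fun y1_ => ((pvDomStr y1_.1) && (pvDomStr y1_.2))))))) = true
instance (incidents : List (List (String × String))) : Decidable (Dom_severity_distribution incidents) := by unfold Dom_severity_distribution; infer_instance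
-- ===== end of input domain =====

-- B replaces A's single mutating pass over a pre-built nested dict by a nested
-- comprehension over the fixed hazard/label template, counting each cell with its
-- own scan (idiomatic; same O(n) cost).


-- ===== PORT A =====
-- i.get(k): first-match lookup in the association list (Python dict semantics)
def pvAGet {α : Type} (d : List (String × α)) (k : String) : Option α :=
  (d.find? (fun p => p.1 == k)).map (·.2)

-- dist[k] = v for a key already present: overwrite in place, keeping position
def pvASet {α : Type} (d : List (String × α)) (k : String) (v : α) : List (String × α) :=
  d.map (fun p => if p.1 == k then (k, v) else p)

-- the loop body of A: 'hazard in dist and label in dist[hazard]' then increment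
def pvAStep (dist : List (String × List (String × Int))) (i : List (String × String)) :
    List (String × List (String × Int)) :=
  match pvAGet i "type" with
  | none => dist
  | some hazard =>
    match pvAGet dist hazard with
    | none => dist
    | some inner =>
      match pvAGet i "severity_label" with
      | none => dist
      | some label =>
        match pvAGet inner label with
        | none => dist
        | some v => pvASet dist hazard (pvASet inner label (v + 1))

def severity_distribution (incidents : List (List (String × String))) : List (String × List (String × Int)) :=
  let dist : List (String × List (String × Int)) :=
    [("pothole", [("LOW", 0), ("MEDIUM", 0), ("HIGH", 0)]),
     ("animal", [("LOW", 0), ("MEDIUM", 0), ("HIGH", 0)]),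
     ("accident", [("LOW", 0), ("MEDIUM", 0), ("HIGH", 0)])]
  incidents.foldl pvAStep dist

-- ===== PORT B =====
-- sum(1 for i in incidents if i.get('type') == h and i.get('severity_label') == l)
def pvBCell (incidents : List (List (String × String))) (h l : String) : Int :=
  (incidents.countP (fun i => pvAGet i "type" == some h && pvAGet i "severity_label" == some l) : Int)

def severity_distribution_alt (incidents : List (List (String × String))) : List (String × List (String × Int)) :=
  ["pothole", "animal", "accident"].map (fun h =>
    (h, ["LOW", "MEDIUM", "HIGH"].map (fun l => (l, pvBCell incidents h l))))

-- ===== PRECONDITION & SPEC =====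
def Spec_severity_distribution (incidents : List (List (String × String))) (out : List (String × List (String × Int))) : Prop := out = severity_distribution_alt incidents
instance (incidents : List (List (String × String))) (out : List (String × List (String × Int))) : Decidable (Spec_severity_distribution incidents out) := by unfold Spec_severity_distribution; infer_instance

-- ===== CLAIM (what is proved, stated in full; the proofs are below) =====
def Claim_equal_severity_distribution : Prop := ∀ (incidents : List (List (String × String))), Dom_severity_distribution incidents → Spec_severity_distribution incidents (severity_distribution incidents)

-- ===== LEMMAS AND PROOFS =====
-- the invariant shape of A's dist: the fixed 3×3 template with nine counters
def pvTmpl (a b c d e f g h i : Int) : List (String × List (String × Int)) :=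
  [("pothole", [("LOW", a), ("MEDIUM", b), ("HIGH", c)]),
   ("animal", [("LOW", d), ("MEDIUM", e), ("HIGH", f)]),
   ("accident", [("LOW", g), ("MEDIUM", h), ("HIGH", i)])]

def pvPred (hz l : String) (x : List (String × String)) : Bool :=
  pvAGet x "type" == some hz && pvAGet x "severity_label" == some l

lemma pvAdd_shift (p : Prop) [Decidable p] (a n : Int) :
    (a + if p then (1 : Int) else 0) + n = a + (n + if p then 1 else 0) := by
  split_ifs <;> ring

lemma pvAStep_tmpl (x : List (String × String)) (a b c d e f g h i : Int) :
    pvAStep (pvTmpl a b c d e f g h i) x =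
      pvTmpl (a + if pvPred "pothole" "LOW" x then 1 else 0)
             (b + if pvPred "pothole" "MEDIUM" x then 1 else 0)
             (c + if pvPred "pothole" "HIGH" x then 1 else 0)
             (d + if pvPred "animal" "LOW" x then 1 else 0)
             (e + if pvPred "animal" "MEDIUM" x then 1 else 0)
             (f + if pvPred "animal" "HIGH" x then 1 else 0)
             (g + if pvPred "accident" "LOW" x then 1 else 0)
             (h + if pvPred "accident" "MEDIUM" x then 1 else 0)
             (i + if pvPred "accident" "HIGH" x then 1 else 0) := by
  rcases hx : pvAGet x "type" with _ | hz
  · simp [pvAStep, pvPred, hx, pvTmpl]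
  · rcases hy : pvAGet x "severity_label" with _ | lb
    · by_cases h1 : hz = "pothole"
      · subst h1; simp only [pvAStep, pvPred, hx, hy]; simp [pvTmpl, pvAGet]
      · by_cases h2 : hz = "animal"
        · subst h2; simp only [pvAStep, pvPred, hx, hy]; simp [pvTmpl, pvAGet]
        · by_cases h3 : hz = "accident"
          · subst h3; simp only [pvAStep, pvPred, hx, hy]; simp [pvTmpl, pvAGet]
          · simp only [pvAStep, pvPred, hx, hy]; simp [pvTmpl, pvAGet, Ne.symm h1, Ne.symm h2, Ne.symm h3]; try tauto
    · by_cases h1 : hz = "pothole"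
      · subst h1
        by_cases g1 : lb = "LOW"
        · subst g1; simp only [pvAStep, pvPred, hx, hy]; simp [pvTmpl, pvAGet, pvASet]
        · by_cases g2 : lb = "MEDIUM"
          · subst g2; simp only [pvAStep, pvPred, hx, hy]; simp [pvTmpl, pvAGet, pvASet]
          · by_cases g3 : lb = "HIGH"
            · subst g3; simp only [pvAStep, pvPred, hx, hy]; simp [pvTmpl, pvAGet, pvASet]
            · simp only [pvAStep, pvPred, hx, hy]; simp [pvTmpl, pvAGet, Ne.symm g1, Ne.symm g2, Ne.symm g3]; try exact ⟨g1, g2, g3⟩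
      · by_cases h2 : hz = "animal"
        · subst h2
          by_cases g1 : lb = "LOW"
          · subst g1; simp only [pvAStep, pvPred, hx, hy]; simp [pvTmpl, pvAGet, pvASet]
          · by_cases g2 : lb = "MEDIUM"
            · subst g2; simp only [pvAStep, pvPred, hx, hy]; simp [pvTmpl, pvAGet, pvASet]
            · by_cases g3 : lb = "HIGH"
              · subst g3; simp only [pvAStep, pvPred, hx, hy]; simp [pvTmpl, pvAGet, pvASet]
              · simp only [pvAStep, pvPred, hx, hy]; simp [pvTmpl, pvAGet, Ne.symm g1, Ne.symm g2, Ne.symm g3]; try exact ⟨g1, g2, g3⟩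
        · by_cases h3 : hz = "accident"
          · subst h3
            by_cases g1 : lb = "LOW"
            · subst g1; simp only [pvAStep, pvPred, hx, hy]; simp [pvTmpl, pvAGet, pvASet]
            · by_cases g2 : lb = "MEDIUM"
              · subst g2; simp only [pvAStep, pvPred, hx, hy]; simp [pvTmpl, pvAGet, pvASet]
              · by_cases g3 : lb = "HIGH"
                · subst g3; simp only [pvAStep, pvPred, hx, hy]; simp [pvTmpl, pvAGet, pvASet]
                · simp only [pvAStep, pvPred, hx, hy]; simp [pvTmpl, pvAGet, Ne.symm g1, Ne.symm g2, Ne.symm g3]; try exact ⟨g1, g2, g3⟩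
          · simp only [pvAStep, pvPred, hx, hy]; simp [pvTmpl, pvAGet, Ne.symm h1, Ne.symm h2, Ne.symm h3]; try tauto

lemma pvFoldl_tmpl (incs : List (List (String × String))) (a b c d e f g h i : Int) :
    incs.foldl pvAStep (pvTmpl a b c d e f g h i) =
      pvTmpl (a + (incs.countP (pvPred "pothole" "LOW") : Int))
             (b + (incs.countP (pvPred "pothole" "MEDIUM") : Int))
             (c + (incs.countP (pvPred "pothole" "HIGH") : Int))
             (d + (incs.countP (pvPred "animal" "LOW") : Int))
             (e + (incs.countP (pvPred "animal" "MEDIUM") : Int))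
             (f + (incs.countP (pvPred "animal" "HIGH") : Int))
             (g + (incs.countP (pvPred "accident" "LOW") : Int))
             (h + (incs.countP (pvPred "accident" "MEDIUM") : Int))
             (i + (incs.countP (pvPred "accident" "HIGH") : Int)) := by
  induction incs generalizing a b c d e f g h i with
  | nil => simp
  | cons x t ih =>
    rw [List.foldl_cons, pvAStep_tmpl, ih]
    simp only [List.countP_cons]
    push_cast
    simp only [pvAdd_shift]

-- ===== VERDICT (by name: the statement is the Claim_ definition above) =====
theorem severity_distribution_spec : Claim_equal_severity_distribution := by
  intro incidents _
  show severity_distribution incidents = severity_distribution_alt incidents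
  have hA : severity_distribution incidents
      = List.foldl pvAStep (pvTmpl 0 0 0 0 0 0 0 0 0) incidents := rfl
  rw [hA, pvFoldl_tmpl]
  simp only [zero_add]
  rfl
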